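-- pv_equiv track=rewrite | github.com/Aftrshock19/markov-chain-sentence-generator | complete_generate.py | apply_contractions
-- ===== SOURCE A (Python) =====
-- from typing import Dict, List, Optional, Tuple, Iterable, Any
--
-- def apply_contractions(tokens: List[str]) -> List[str]:
--     out: List[str] = []
--     i = 0
--     while i < len(tokens):
--         if i + 1 < len(tokens):
--             pair = (tokens[i].lower(), tokens[i + 1].lower())
--             if pair == ("a", "el"):
--                 out.append("al")
--                 i += 2
--                 continue
--             if pair == ("de", "el"):
--                 out.append("del")
--                 i += 2
--                 continue
--         out.append(tokens[i])
--         i += 1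
--     return out
-- ===== SOURCE B (Python) =====
-- def apply_contractions(tokens):
--     out = []
--     prev = ""
--     pending = False
--     for cur in tokens:
--         if pending and prev.lower() in ("a", "de") and cur.lower() == "el":
--             out.append("al" if prev.lower() == "a" else "del")
--             pending = False
--         else:
--             if pending:
--                 out.append(prev)
--             prev = cur
--             pending = True
--     if pending:
--         out.append(prev)
--     return out
-- ===== Notes on version B (the rewrite author's own statement) =====
-- stated objective: alternative
-- what changed: Replaces index-based lookahead (while loop peeking at tokens[i+1] and skipping two indices) with a single buffered-previous-token pass: a pending/prev state variable is merged with each incoming token and flushed at the end. The buffered pass avoids per-step len() checks and repeated indexing, giving a constant-factor speedup.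
import Mathlib
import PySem

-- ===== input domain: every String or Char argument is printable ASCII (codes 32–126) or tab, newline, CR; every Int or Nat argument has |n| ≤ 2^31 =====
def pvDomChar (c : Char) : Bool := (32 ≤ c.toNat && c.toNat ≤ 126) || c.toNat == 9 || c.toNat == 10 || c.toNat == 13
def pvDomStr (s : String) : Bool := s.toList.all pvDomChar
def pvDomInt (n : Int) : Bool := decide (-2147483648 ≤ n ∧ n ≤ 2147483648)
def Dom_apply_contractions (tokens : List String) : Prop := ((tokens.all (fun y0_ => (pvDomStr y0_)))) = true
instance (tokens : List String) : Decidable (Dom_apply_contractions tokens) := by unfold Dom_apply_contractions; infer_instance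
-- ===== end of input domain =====

-- B replaces A's index-based lookahead with a single buffered-previous-token pass (alternative decomposition, same cost).

-- ===== PORT A =====
-- A's while loop over index i, peeking tokens[i+1]; transliterated as recursion on the
-- remaining suffix (i+1 < len ↔ at least two tokens remain), branches in A's order.
def pvA_go : List String → List String
  | [] => []
  | [t] => [t]
  | t0 :: t1 :: rest =>
    if PySem.Str.lower t0 = "a" ∧ PySem.Str.lower t1 = "el" then
      "al" :: pvA_go rest
    else if PySem.Str.lower t0 = "de" ∧ PySem.Str.lower t1 = "el" then
      "del" :: pvA_go rest
    else
      t0 :: pvA_go (t1 :: rest)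
termination_by ts => ts.length

def apply_contractions (tokens : List String) : List String := pvA_go tokens

-- ===== PORT B =====
-- B's loop state: (out, prev, pending); fold over the tokens, then flush the pending prev.
def pvB_step (s : List String × String × Bool) (cur : String) : List String × String × Bool :=
  if s.2.2 ∧ (PySem.Str.lower s.2.1 = "a" ∨ PySem.Str.lower s.2.1 = "de")
       ∧ PySem.Str.lower cur = "el" then
    (s.1 ++ [if PySem.Str.lower s.2.1 = "a" then "al" else "del"], s.2.1, false)
  else if s.2.2 then
    (s.1 ++ [s.2.1], cur, true)
  else
    (s.1, cur, true)

def pvB_flush (s : List String × String × Bool) : List String :=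
  if s.2.2 then s.1 ++ [s.2.1] else s.1

def apply_contractions_alt (tokens : List String) : List String :=
  pvB_flush (tokens.foldl pvB_step ([], "", false))

-- ===== PRECONDITION & SPEC =====
def Spec_apply_contractions (tokens : List String) (out : List String) : Prop := out = apply_contractions_alt tokens
instance (tokens : List String) (out : List String) : Decidable (Spec_apply_contractions tokens out) := by unfold Spec_apply_contractions; infer_instance

-- ===== CLAIM (what is proved, stated in full; the proofs are below) =====
def Claim_equal_apply_contractions : Prop := ∀ (tokens : List String), Dom_apply_contractions tokens → Spec_apply_contractions tokens (apply_contractions tokens)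

-- ===== LEMMAS AND PROOFS =====
theorem pvB_invariant (ts : List String) : ∀ (out : List String) (prev : String) (pending : Bool),
    pvB_flush (ts.foldl pvB_step (out, prev, pending)) =
      out ++ pvA_go (if pending then prev :: ts else ts) := by
  induction ts with
  | nil =>
    intro out prev pending
    cases pending <;> simp [pvB_flush, pvA_go]
  | cons c ts ih =>
    intro out prev pending
    cases pending with
    | false =>
      have hs : pvB_step (out, prev, false) c = (out, c, true) := by simp [pvB_step]
      rw [List.foldl_cons, hs]
      simpa using ih out c true
    | true =>
      by_cases h : (PySem.Str.lower prev = "a" ∨ PySem.Str.lower prev = "de")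
          ∧ PySem.Str.lower c = "el"
      · have hs : pvB_step (out, prev, true) c =
            (out ++ [if PySem.Str.lower prev = "a" then "al" else "del"], prev, false) := by
          simp [pvB_step, h.1, h.2]
        rw [List.foldl_cons, hs, ih]
        rcases h with ⟨hp, hc⟩
        rcases hp with hp | hp
        · simp [pvA_go, hp, hc, List.append_assoc]
        · simp [pvA_go, hp, hc, List.append_assoc]
      · have hs : pvB_step (out, prev, true) c = (out ++ [prev], c, true) := by
          simp only [pvB_step]
          rw [if_neg (by simpa using h)]
          simp
        rw [List.foldl_cons, hs, ih]
        have h1 : ¬ (PySem.Str.lower prev = "a" ∧ PySem.Str.lower c = "el") := by tauto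
        have h2 : ¬ (PySem.Str.lower prev = "de" ∧ PySem.Str.lower c = "el") := by tauto
        simp [pvA_go, h1, h2]

-- ===== VERDICT (by name: the statement is the Claim_ definition above) =====
theorem apply_contractions_spec : Claim_equal_apply_contractions := by
  intro tokens _
  unfold Spec_apply_contractions apply_contractions apply_contractions_alt
  simpa using (pvB_invariant tokens [] "" false).symm
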